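-- pv_equiv track=rewrite | github.com/sarjus/HackerRank-solutions | stringfunctioncalculatio.py | to_int_keys
-- ===== SOURCE A (Python) =====
-- def to_int_keys(arr):
--     """
--     Converts elements of the array to integer keys.
--     """
--     seen = set()
--     int_keys = []
--     for elem in arr:
--         if elem not in seen:
--             int_keys.append(elem)
--             seen.add(elem)
--     int_keys.sort()
--     index = {v: i for i, v in enumerate(int_keys)}
--     return [index[v] for v in arr]
-- ===== SOURCE B (Python) =====
-- def _rank(s, v):
--     """Index of v in the sorted list s (leftmost position with s[pos] >= v)."""
--     lo, hi = 0, len(s)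
--     while lo < hi:
--         mid = (lo + hi) // 2
--         if s[mid] < v:
--             lo = mid + 1
--         else:
--             hi = mid
--     return lo
--
--
-- def to_int_keys(arr):
--     """
--     Converts elements of the array to integer keys.
--     """
--     s = sorted(set(arr))
--     return [_rank(s, v) for v in arr]
-- ===== Notes on version B (the rewrite author's own statement) =====
-- stated objective: alternative
-- what changed: B drops A's first-occurrence dedup loop and the enumerate-built position dict: it sorts the set once and finds each element's rank by a hand-written binary search over the sorted distinct values.
import Mathlib
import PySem

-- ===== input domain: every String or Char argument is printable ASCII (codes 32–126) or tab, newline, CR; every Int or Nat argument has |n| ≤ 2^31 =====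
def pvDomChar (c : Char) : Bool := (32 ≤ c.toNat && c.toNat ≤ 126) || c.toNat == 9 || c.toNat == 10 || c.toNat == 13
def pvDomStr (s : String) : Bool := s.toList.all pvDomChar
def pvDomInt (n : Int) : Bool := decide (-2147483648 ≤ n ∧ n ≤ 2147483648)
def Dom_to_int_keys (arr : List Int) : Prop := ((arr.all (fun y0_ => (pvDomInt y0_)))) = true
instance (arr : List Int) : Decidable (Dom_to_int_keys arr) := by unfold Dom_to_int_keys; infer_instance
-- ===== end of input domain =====

-- B replaces A's dedup-loop + position-dict pipeline by one sort of the set and a binary search per element (alternative decomposition, no speed claim).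

-- ===== PORT A =====
-- the 'for elem in arr' loop building (seen, int_keys)
def to_int_keys_loop (arr : List Int) (st : PySem.Set Int × List Int) : PySem.Set Int × List Int :=
  arr.foldl (fun st elem =>
    if PySem.Set.contains st.1 elem then st
    else (PySem.Set.add st.1 elem, st.2 ++ [elem])) st

def to_int_keys (arr : List Int) : List Int :=
  let int_keys := (to_int_keys_loop arr (PySem.Set.empty, [])).2
  let int_keys := PySem.List.sorted int_keys (fun x => x) false
  let index := (PySem.List.enumerate int_keys).foldl
    (fun d p => d.insert p.2 p.1) PySem.Dict.empty
  arr.map (fun v => index.getD v 0)  -- index[v]: v is always a key (v ∈ arr ⇒ v ∈ int_keys), so getD's default is never used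

-- ===== PORT B =====
-- _rank's while loop as structural recursion on hi - lo; lo, hi are the same (nonnegative) values as Python's,
-- kept as Nat so (lo + hi) / 2 is Python's (lo + hi) // 2 on nonnegative ints; s[mid] is always in range here,
-- pyGetD gives it a default 0 that is never used (lo ≤ mid < hi ≤ len s)
def rank_loop (s : List Int) (v : Int) (lo hi : Nat) : Nat :=
  if h : lo < hi then
    let mid := (lo + hi) / 2
    if PySem.List.pyGetD s (mid : Int) 0 < v then rank_loop s v (mid + 1) hi
    else rank_loop s v lo mid
  else lo
termination_by hi - lo
decreasing_by all_goals omega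

def to_int_keys_alt (arr : List Int) : List Int :=
  let s := PySem.List.sorted (PySem.Set.ofList arr) (fun x => x) false
  arr.map (fun v => ((rank_loop s v 0 s.length : Nat) : Int))

-- ===== PRECONDITION & SPEC =====
def Spec_to_int_keys (arr : List Int) (out : List Int) : Prop := out = to_int_keys_alt arr
instance (arr : List Int) (out : List Int) : Decidable (Spec_to_int_keys arr out) := by unfold Spec_to_int_keys; infer_instance

-- ===== CLAIM (what is proved, stated in full; the proofs are below) =====
def Claim_equal_to_int_keys : Prop := ∀ (arr : List Int), Dom_to_int_keys arr → Spec_to_int_keys arr (to_int_keys arr)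

-- ===== LEMMAS AND PROOFS =====

-- A's loop with seen = int_keys keeps them equal and both are the ordered dedup (Set.ofList).
theorem loop_eq (arr : List Int) (s : PySem.Set Int) :
    to_int_keys_loop arr (s, s) = (PySem.Set.update s arr, PySem.Set.update s arr) := by
  induction arr generalizing s with
  | nil => rfl
  | cons x t ih =>
      simp only [to_int_keys_loop, List.foldl_cons, PySem.Set.update] at *
      by_cases h : x ∈ s
      · have hadd : PySem.Set.add s x = s := by
          simp [PySem.Set.add, PySem.Set.contains, h]
        simpa [PySem.Set.contains, h, hadd] using ih s
      · have hadd : PySem.Set.add s x = s ++ [x] := by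
          simp [PySem.Set.add, PySem.Set.contains, h]
        simpa [PySem.Set.contains, h, hadd] using ih (s ++ [x])

-- a fold of inserts whose keys avoid v leaves v's lookup unchanged
theorem getD_foldl_insert_of_ne (l : List (Int × Int)) (d : PySem.Dict Int Int) (v : Int)
    (h : ∀ p ∈ l, p.2 ≠ v) :
    (l.foldl (fun d p => d.insert p.2 p.1) d).getD v 0 = d.getD v 0 := by
  induction l generalizing d with
  | nil => rfl
  | cons p t ih =>
      simp only [List.foldl_cons]
      rw [ih _ (fun q hq => h q (List.mem_cons_of_mem _ hq))]
      exact PySem.Dict.getD_insert_of_ne _ _ _ (h p (List.mem_cons_self)).symm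

-- the enumerate-insert dict looks up the position of v in a nodup list
theorem getD_enum_fold (s : List Int) (hnd : s.Nodup) (v : Int) (hv : v ∈ s)
    (start : Int) (d : PySem.Dict Int Int) :
    ((PySem.List.enumerate s start).foldl (fun d p => d.insert p.2 p.1) d).getD v 0
      = start + (s.idxOf v : Int) := by
  induction s generalizing start d with
  | nil => cases hv
  | cons x t ih =>
      rw [PySem.List.enumerate_cons]
      simp only [List.foldl_cons]
      by_cases hx : v = x
      · subst hx
        have hvt : v ∉ t := (List.nodup_cons.mp hnd).1
        rw [getD_foldl_insert_of_ne]
        · simp [PySem.Dict.getD_insert_self, List.idxOf_cons_self]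
        · intro p hp hpv
          exact hvt (by
            have := PySem.List.map_snd_enumerate t (start + 1)
            have : p.2 ∈ t := this ▸ List.mem_map_of_mem hp
            exact hpv ▸ this)
      · have hvt : v ∈ t := (List.mem_cons.mp hv).resolve_left hx
        rw [ih (List.nodup_cons.mp hnd).2 hvt (start + 1) _]
        rw [List.idxOf_cons_ne _ (by exact fun h => hx h.symm)]
        push_cast
        ring
-- binary-search invariant: rank_loop returns a split point with everything below < v and everything at/above ≥ v
theorem rank_loop_spec (s : List Int) (v : Int) (hs : s.Pairwise (· ≤ ·)) :
    ∀ (n lo hi : Nat), hi - lo ≤ n → hi ≤ s.length → lo ≤ hi →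
    (∀ j (hj : j < s.length), j < lo → s[j] < v) →
    (∀ j (hj : j < s.length), hi ≤ j → v ≤ s[j]) →
    lo ≤ rank_loop s v lo hi ∧ rank_loop s v lo hi ≤ hi ∧
    (∀ j (hj : j < s.length), j < rank_loop s v lo hi → s[j] < v) ∧
    (∀ j (hj : j < s.length), rank_loop s v lo hi ≤ j → v ≤ s[j]) := by
  intro n
  induction n with
  | zero =>
      intro lo hi hn hhi hlh hlo hup
      have hlh' : hi = lo := by omega
      rw [rank_loop]
      simp only [hlh', lt_irrefl, dif_neg, not_false_iff]
      exact ⟨le_refl _, le_refl _, fun j hj h => hlo j hj h, fun j hj h => hup j hj (by omega)⟩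
  | succ n ih =>
      intro lo hi hn hhi hlh hlo hup
      rw [rank_loop]
      by_cases h : lo < hi
      · simp only [dif_pos h]
        have hmid1 : (lo + hi) / 2 < hi := by omega
        have hmid0 : lo ≤ (lo + hi) / 2 := by omega
        have hmlen : (lo + hi) / 2 < s.length := by omega
        have hget : PySem.List.pyGetD s (((lo + hi) / 2 : Nat) : Int) 0 = s[(lo + hi) / 2] := by
          rw [PySem.List.pyGetD_natCast, List.getD_eq_getElem s 0 hmlen]
        rw [hget]
        by_cases hc : s[(lo + hi) / 2] < v
        · simp only [if_pos hc]
          have hlo' : ∀ j (hj : j < s.length), j < (lo + hi) / 2 + 1 → s[j] < v := by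
            intro j hj hjlt
            rcases Nat.lt_or_ge j ((lo + hi) / 2) with hj2 | hj2
            · exact lt_of_le_of_lt
                ((List.pairwise_iff_getElem.mp hs) j ((lo + hi) / 2) hj hmlen hj2) hc
            · have hje : j = (lo + hi) / 2 := by omega
              subst hje
              exact hc
          obtain ⟨h1, h2, h3, h4⟩ :=
            ih ((lo + hi) / 2 + 1) hi (by omega) hhi (by omega) hlo' hup
          exact ⟨by omega, h2, h3, h4⟩
        · simp only [if_neg hc]
          have hup' : ∀ j (hj : j < s.length), (lo + hi) / 2 ≤ j → v ≤ s[j] := by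
            intro j hj hjge
            rcases Nat.eq_or_lt_of_le hjge with hj3 | hj3
            · subst hj3
              exact not_lt.mp hc
            · exact le_trans (not_lt.mp hc)
                ((List.pairwise_iff_getElem.mp hs) ((lo + hi) / 2) j hmlen hj hj3)
          obtain ⟨h1, h2, h3, h4⟩ :=
            ih lo ((lo + hi) / 2) (by omega) (by omega) (by omega) hlo hup'
          exact ⟨h1, by omega, h3, h4⟩
      · simp only [dif_neg h]
        exact ⟨le_refl _, (by omega : lo ≤ hi), fun j hj hjlt => hlo j hj hjlt,
               fun j hj hjge => hup j hj (by omega)⟩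

-- on a strictly increasing list containing v, the binary search lands exactly on v's index
theorem rank_loop_eq_idxOf (s : List Int) (hpw : s.Pairwise (· < ·)) (v : Int) (hv : v ∈ s) :
    rank_loop s v 0 s.length = s.idxOf v := by
  obtain ⟨_, hk2, hk3, hk4⟩ :=
    rank_loop_spec s v (hpw.imp le_of_lt) s.length 0 s.length (by omega) (le_refl _)
      (by omega) (by omega) (by omega)
  set k := rank_loop s v 0 s.length with hk
  have hi : s.idxOf v < s.length := List.idxOf_lt_length_of_mem hv
  have hgi : s[s.idxOf v] = v := List.getElem_idxOf hi
  have hki : k ≤ s.idxOf v := by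
    by_contra hcon
    have h := hk3 (s.idxOf v) hi (by omega)
    rw [hgi] at h
    exact lt_irrefl v h
  rcases Nat.eq_or_lt_of_le hki with heq | hlt
  · exact heq
  · have hkl : k < s.length := by omega
    have h1 : v ≤ s[k] := hk4 k hkl (le_refl _)
    have h2 := (List.pairwise_iff_getElem.mp hpw) k (s.idxOf v) hkl hi hlt
    rw [hgi] at h2
    omega

-- ===== VERDICT (by name: the statement is the Claim_ definition above) =====
theorem to_int_keys_spec : Claim_equal_to_int_keys := by
  intro arr _
  unfold Spec_to_int_keys to_int_keys to_int_keys_alt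
  have hloop : (to_int_keys_loop arr (PySem.Set.empty, [])).2 = PySem.Set.ofList arr := by
    have := loop_eq arr PySem.Set.empty
    simp only [PySem.Set.empty] at this
    rw [show ((PySem.Set.empty : PySem.Set Int), ([] : List Int)) = (([] : List Int), ([] : List Int)) from rfl, this]
    rfl
  rw [hloop]
  apply List.map_congr_left
  intro v hv
  set s := PySem.List.sorted (PySem.Set.ofList arr) (fun x => x) false with hs
  have hperm : s.Perm (PySem.Set.ofList arr) := PySem.List.sorted_perm _ _ _
  have hpw : s.Pairwise (· < ·) := PySem.List.sorted_ofList_pairwise_lt arr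
  have hnd : s.Nodup := hpw.nodup
  have hvs : v ∈ s := hperm.mem_iff.mpr ((PySem.Set.mem_ofList arr v).mpr hv)
  rw [getD_enum_fold s hnd v hvs 0 PySem.Dict.empty, zero_add,
      rank_loop_eq_idxOf s hpw v hvs]
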